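-- pv_equiv track=rewrite | github.com/alerodang/UndergroundRouteGeneticAlgorithm | geneticalAlgorithm/operators/Crossover.py | repairChromosome
-- ===== SOURCE A (Python) =====
-- def repairChromosome(chromosome):
--
--     firstRepeatedAllele = None
--     for gen in chromosome:
--         if chromosome.count(gen) > 1:
--             firstRepeatedAllele = gen
--             break
--
--     if firstRepeatedAllele is None:
--         return chromosome
--
--     firstRepeatedAlleleIndex = chromosome.index(firstRepeatedAllele)
--     secondRepeatedAlleleIndex = chromosome[firstRepeatedAlleleIndex + 1:].index(firstRepeatedAllele)
--
--     return chromosome[0:firstRepeatedAlleleIndex] + chromosome[firstRepeatedAlleleIndex + 1 + secondRepeatedAlleleIndex:]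
-- ===== SOURCE B (Python) =====
-- def repairChromosome(chromosome):
--     # Sort the index list by gene value (stable, so equal genes keep index order);
--     # duplicate genes then sit adjacent, and each adjacent equal pair is a pair of
--     # consecutive occurrences.  Keep the pair whose first occurrence is earliest.
--     order = sorted(range(len(chromosome)), key=lambda k: chromosome[k])
--     best = None
--     for a, b in zip(order, order[1:]):
--         if chromosome[a] == chromosome[b] and (best is None or a < best[0]):
--             best = (a, b)
--     if best is None:
--         return chromosome
--     return chromosome[:best[0]] + chromosome[best[1]:]
-- ===== Notes on version B (the rewrite author's own statement) =====
-- stated objective: alternative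
-- what changed: Replaced A's find-duplicate-by-count()-then-two-index()-scans with a sort-based algorithm: stably sort the index list by gene value so duplicate genes become adjacent, then scan adjacent index pairs once keeping the pair with the smallest first index.
import Mathlib
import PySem

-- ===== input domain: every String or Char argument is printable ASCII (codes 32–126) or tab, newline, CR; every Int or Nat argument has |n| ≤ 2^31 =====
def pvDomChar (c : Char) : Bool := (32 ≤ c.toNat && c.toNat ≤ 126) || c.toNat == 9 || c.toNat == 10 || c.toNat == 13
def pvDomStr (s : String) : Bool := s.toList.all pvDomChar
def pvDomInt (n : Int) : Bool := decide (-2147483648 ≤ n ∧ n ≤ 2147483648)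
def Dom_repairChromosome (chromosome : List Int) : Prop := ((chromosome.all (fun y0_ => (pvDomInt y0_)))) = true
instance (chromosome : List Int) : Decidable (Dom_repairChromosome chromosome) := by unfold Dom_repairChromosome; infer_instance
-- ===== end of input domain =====

-- B re-solves the task by a sort: stably sort the index list by gene value so equal
-- genes become adjacent, then scan adjacent pairs for the earliest duplicate —
-- a different algorithm from A's count()/index() scans (objective: alternative).


-- ===== PORT A =====
-- A's first loop: 'for gen in chromosome: if chromosome.count(gen) > 1: … break'
def findRep (full : List Int) : List Int → Option Int
  | [] => none
  | g :: rest => if 1 < PySem.List.count full g then some g else findRep full rest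

def repairChromosome (chromosome : List Int) : List Int :=
  match findRep chromosome chromosome with
  | none => chromosome
  | some g =>
    match PySem.List.index? chromosome g with
    | none => []   -- unreachable: g was returned by findRep, so g ∈ chromosome
    | some i =>
      match PySem.List.index? (PySem.List.slice chromosome (some ((i : Int) + 1)) none) g with
      | none => []   -- unreachable: g has count > 1, so it occurs after position i
      | some m =>
        PySem.List.slice chromosome (some 0) (some (i : Int)) ++
          PySem.List.slice chromosome (some ((i : Int) + 1 + (m : Int))) none

-- ===== PORT B =====
-- Source B: 'order = sorted(range(len(chromosome)), key=lambda k: chromosome[k])';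
-- the key 'chromosome[k]' is ported as pyGetD (exact: k ∈ range(len) is always in range).
-- Loop body 'if chromosome[a] == chromosome[b] and (best is None or a < best[0]): best = (a, b)'
-- is ported with Python's short-circuit and/or spelled as nested if/match.
def repairChromosome_alt (chromosome : List Int) : List Int :=
  let order := PySem.List.sorted (PySem.List.pyRange 0 (PySem.List.len chromosome))
      (fun k => PySem.List.pyGetD chromosome k 0) false
  let best := (order.zip (PySem.List.slice order (some 1) none)).foldl
      (fun best p =>
        if PySem.List.pyGetD chromosome p.1 0 = PySem.List.pyGetD chromosome p.2 0 then
          match best with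
          | none => some p
          | some bb => if p.1 < bb.1 then some p else some bb
        else best)
      (none : Option (Int × Int))
  match best with
  | none => chromosome
  | some b =>
    PySem.List.slice chromosome none (some b.1) ++ PySem.List.slice chromosome (some b.2) none

-- ===== PRECONDITION & SPEC =====
def Spec_repairChromosome (chromosome : List Int) (out : List Int) : Prop := out = repairChromosome_alt chromosome
instance (chromosome : List Int) (out : List Int) : Decidable (Spec_repairChromosome chromosome out) := by unfold Spec_repairChromosome; infer_instance

-- ===== CLAIM (what is proved, stated in full; the proofs are below) =====
def Claim_equal_repairChromosome : Prop := ∀ (chromosome : List Int), Dom_repairChromosome chromosome → Spec_repairChromosome chromosome (repairChromosome chromosome)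

-- ===== LEMMAS AND PROOFS =====

-- Reference description shared by both proofs: the first position i whose value
-- recurs later, paired with the next occurrence j of that value (k = absolute offset).
def refAux : List Int → Nat → Option (Nat × Nat)
  | [], _ => none
  | g :: rest, k =>
    match rest.idxOf? g with
    | some m => some (k, k + 1 + m)
    | none => refAux rest (k + 1)

lemma refAux_shift (l : List Int) (k : Nat) :
    refAux l k = (refAux l 0).map (fun ij => (ij.1 + k, ij.2 + k)) := by
  induction l generalizing k with
  | nil => simp [refAux]
  | cons g rest ih =>
    cases h : rest.idxOf? g with
    | some m => simp [refAux, h]; omega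
    | none =>
      simp only [refAux, h]
      rw [ih (k+1), ih 1]
      cases refAux rest 0 <;> simp
      omega

lemma refAux_none (l : List Int) (h : refAux l 0 = none) :
    ∀ m (hm : m < l.length), l[m] ∉ l.drop (m + 1) := by
  induction l with
  | nil => simp
  | cons g rest ih =>
    cases hf : rest.idxOf? g with
    | some m => simp [refAux, hf] at h
    | none =>
      simp only [refAux, hf] at h
      rw [refAux_shift] at h
      cases hr : refAux rest 0 with
      | some b => simp [hr] at h
      | none =>
        intro m hm
        cases m with
        | zero => simpa using List.idxOf?_eq_none_iff.mp hf
        | succ m' =>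
          simp only [List.getElem_cons_succ, List.drop_succ_cons]
          exact ih hr m' (by simpa using hm)

lemma refAux_some (l : List Int) (i j : Nat) (h : refAux l 0 = some (i, j)) :
    ∃ (hi : i < l.length),
      (l.drop (i + 1)).idxOf? l[i] = some (j - (i + 1)) ∧ i + 1 ≤ j ∧
      ∀ m (hm : m < i), l[m] ∉ l.drop (m + 1) := by
  induction l generalizing i j with
  | nil => simp [refAux] at h
  | cons g rest ih =>
    cases hf : rest.idxOf? g with
    | some m =>
      simp only [refAux, hf] at h
      simp only [Option.some.injEq, Prod.mk.injEq] at h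
      obtain ⟨hi, hj⟩ := h
      subst hi; subst hj
      refine ⟨by simp, ?_, by omega, by omega⟩
      simpa using hf
    | none =>
      simp only [refAux, hf] at h
      rw [refAux_shift] at h
      cases hr : refAux rest 0 with
      | none => simp [hr] at h
      | some b =>
        obtain ⟨i', j'⟩ := b
        simp only [hr, Option.map_some, Option.some.injEq, Prod.mk.injEq] at h
        obtain ⟨hi1, hj1⟩ := h
        subst hi1; subst hj1
        obtain ⟨hi', h1, h2, h3⟩ := ih i' j' hr
        refine ⟨by simpa using Nat.succ_lt_succ hi', ?_, by omega, ?_⟩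
        · have : j' + (0 + 1) - (i' + (0 + 1) + 1) = j' - (i' + 1) := by omega
          simpa [this] using h1
        · intro m hm
          cases m with
          | zero => simpa using List.idxOf?_eq_none_iff.mp hf
          | succ m' =>
            simp only [List.getElem_cons_succ, List.drop_succ_cons]
            exact h3 m' (by omega)

lemma no_earlier_dup (l : List Int) (k : Nat) (hk : k < l.length)
    (hbef : ∀ m (hm : m < k), l[m] ∉ l.drop (m + 1)) :
    l[k] ∉ l.take k := by
  intro hmem
  obtain ⟨m, hm, hmeq⟩ := List.mem_take_iff_getElem.mp hmem
  have hmk : m < k := by omega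
  apply hbef m hmk
  have : (l.drop (m + 1))[k - (m + 1)]'(by simp; omega) = l[k] := by
    simp [List.getElem_drop]
    congr 1
    omega
  rw [hmeq, ← this]
  exact List.getElem_mem _

lemma count_eq_one_of_unique (l : List Int) (k : Nat) (hk : k < l.length)
    (v : Int) (hv : l[k] = v)
    (hafter : v ∉ l.drop (k + 1)) (hnotake : v ∉ l.take k) :
    l.count v = 1 := by
  conv_lhs => rw [← List.take_append_drop k l, List.drop_eq_getElem_cons hk, hv]
  rw [List.count_append, List.count_cons_self]
  rw [List.count_eq_zero.mpr hnotake, List.count_eq_zero.mpr hafter]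

lemma count_gt_one (l : List Int) (k : Nat) (hk : k < l.length)
    (v : Int) (hv : l[k] = v)
    (hafter : v ∈ l.drop (k + 1)) : 1 < l.count v := by
  conv_rhs => rw [← List.take_append_drop k l, List.drop_eq_getElem_cons hk, hv]
  rw [List.count_append, List.count_cons_self]
  have := List.count_pos_iff.mpr hafter
  omega

lemma findRep_drop_some (l : List Int) (i : Nat) (hi : i < l.length)
    (hrec : l[i] ∈ l.drop (i + 1))
    (hbef : ∀ m (hm : m < i), l[m] ∉ l.drop (m + 1)) :
    ∀ k, k ≤ i → findRep l (l.drop k) = some l[i] := by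
  intro k hk
  induction hd : i - k generalizing k with
  | zero =>
    have hki : k = i := by omega
    subst hki
    rw [List.drop_eq_getElem_cons hi]
    have hc : 1 < l.count l[k] := count_gt_one l k hi _ rfl hrec
    simp only [findRep, PySem.List.count_eq, if_pos hc]
  | succ n ihn =>
    have hki : k < i := by omega
    have hkl : k < l.length := by omega
    rw [List.drop_eq_getElem_cons hkl]
    have h1 : l.count l[k] = 1 :=
      count_eq_one_of_unique l k hkl _ rfl (hbef k hki)
        (no_earlier_dup l k hkl (fun m hm => hbef m (by omega)))
    simp only [findRep, PySem.List.count_eq, h1]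
    rw [if_neg (by omega)]
    exact ihn (k + 1) (by omega) (by omega)

lemma findRep_drop_none (l : List Int)
    (hbef : ∀ m (hm : m < l.length), l[m] ∉ l.drop (m + 1)) :
    ∀ k, findRep l (l.drop k) = none := by
  intro k
  induction hd : l.length - k generalizing k with
  | zero =>
    rw [List.drop_eq_nil_of_le (by omega)]
    simp [findRep]
  | succ n ihn =>
    have hkl : k < l.length := by omega
    rw [List.drop_eq_getElem_cons hkl]
    have h1 : l.count l[k] = 1 :=
      count_eq_one_of_unique l k hkl _ rfl (hbef k hkl)
        (no_earlier_dup l k hkl (fun m hm => hbef m (by omega)))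
    simp only [findRep, PySem.List.count_eq, h1]
    rw [if_neg (by omega)]
    exact ihn (k + 1) (by omega)

lemma portA_eq_ref (l : List Int) :
    repairChromosome l =
      (match refAux l 0 with
       | none => l
       | some ij => l.take ij.1 ++ l.drop ij.2) := by
  cases hr : refAux l 0 with
  | none =>
    have h := refAux_none l hr
    have hfind : findRep l l = none := by simpa using findRep_drop_none l h 0
    simp [repairChromosome, hfind]
  | some ij =>
    obtain ⟨i, j⟩ := ij
    obtain ⟨hi, hidx, hij, hbef⟩ := refAux_some l i j hr
    have hmem : l[i] ∈ l.drop (i + 1) := by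
      by_contra hnm
      rw [List.idxOf?_eq_none_iff.mpr hnm] at hidx
      simp at hidx
    have hfind : findRep l l = some l[i] := by
      simpa using findRep_drop_some l i hi hmem hbef 0 (by omega)
    have hnt : l[i] ∉ l.take i := no_earlier_dup l i hi hbef
    have hidx0 : PySem.List.index? l l[i] = some i := by
      rw [PySem.List.index?_eq_some_iff]
      refine ⟨l.take i, l.drop (i + 1), ?_, by simp; omega, hnt⟩
      conv_lhs => rw [← List.take_append_drop i l, List.drop_eq_getElem_cons hi]
    have hcast1 : (i : Int) + 1 = ((i + 1 : Nat) : Int) := by push_cast; ring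
    have hidx1 : PySem.List.index? (PySem.List.slice l (some ((i : Int) + 1)) none) l[i]
        = some (j - (i + 1)) := by
      rw [hcast1, PySem.List.slice_from_natCast, PySem.List.index?_eq_idxOf?, hidx]
    simp only [repairChromosome, hfind, hidx0, hidx1]
    have hcast2 : (i : Int) + 1 + ((j - (i + 1) : Nat) : Int) = ((j : Nat) : Int) := by omega
    rw [hcast2, PySem.List.slice_from_natCast, PySem.List.slice_zero_start,
      PySem.List.slice_to_natCast]

-- ---------- B-side development: the stable sort by value, characterized ----------

-- the key Source B sorts by
def keyOf (cs : List Int) (a : Int) : Int := PySem.List.pyGetD cs a 0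

lemma keyOf_def (cs : List Int) (a : Int) : PySem.List.pyGetD cs a 0 = keyOf cs a := rfl

-- the strict order the stable sort of the (distinct, increasing) index list realises
def Rlex (cs : List Int) (a b : Int) : Prop :=
  keyOf cs a < keyOf cs b ∨ (keyOf cs a = keyOf cs b ∧ a < b)

-- (a, b) is a pair of consecutive occurrences of one value (Int-index form)
def CP (cs : List Int) (a b : Int) : Prop :=
  0 ≤ a ∧ a < b ∧ b < (cs.length : Int) ∧ keyOf cs a = keyOf cs b ∧
    ∀ m, a < m → m < b → keyOf cs m ≠ keyOf cs a

lemma rlex_keyle {cs : List Int} {a b : Int} (h : Rlex cs a b) : keyOf cs a ≤ keyOf cs b := by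
  rcases h with h | ⟨h, _⟩ <;> omega

lemma insertBy_pw (cs : List Int) (x : Int) (ys : List Int)
    (h1 : ys.Pairwise (Rlex cs)) (h2 : ∀ y ∈ ys, y < x) :
    (PySem.List.insertBy (fun a b => decide (keyOf cs a < keyOf cs b)) x ys).Pairwise (Rlex cs) := by
  induction ys with
  | nil => simp [PySem.List.insertBy]
  | cons y ys ih =>
    rw [List.pairwise_cons] at h1
    obtain ⟨h1a, h1b⟩ := h1
    by_cases hxy : keyOf cs x < keyOf cs y
    · simp only [PySem.List.insertBy, decide_eq_true_eq, if_pos hxy]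
      refine List.Pairwise.cons ?_ (List.Pairwise.cons h1a h1b)
      intro z hz
      rcases List.mem_cons.mp hz with hz | hz
      · subst hz; exact Or.inl hxy
      · exact Or.inl (lt_of_lt_of_le hxy (rlex_keyle (h1a z hz)))
    · simp only [PySem.List.insertBy, decide_eq_true_eq, if_neg hxy]
      refine List.Pairwise.cons ?_ (ih h1b (fun z hz => h2 z (List.mem_cons_of_mem _ hz)))
      intro z hz
      rcases (PySem.List.mem_insertBy _ _ _ _).mp hz with hz | hz
      · rw [hz]
        have hyx : y < x := h2 y List.mem_cons_self
        rcases lt_or_eq_of_le (not_lt.mp hxy) with h | h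
        · exact Or.inl h
        · exact Or.inr ⟨h, hyx⟩
      · exact h1a z hz

lemma foldl_ins_pw (cs : List Int) :
    ∀ (l acc : List Int), acc.Pairwise (Rlex cs) → (∀ y ∈ acc, ∀ x ∈ l, y < x) →
      l.Pairwise (· < ·) →
      (l.foldl (fun acc x =>
        PySem.List.insertBy (fun a b => decide (keyOf cs a < keyOf cs b)) x acc) acc).Pairwise (Rlex cs) := by
  intro l
  induction l with
  | nil => intro acc h1 _ _; simpa using h1
  | cons x l ih =>
    intro acc h1 h2 h3
    rw [List.pairwise_cons] at h3
    obtain ⟨h3a, h3b⟩ := h3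
    simp only [List.foldl_cons]
    apply ih
    · exact insertBy_pw cs x acc h1 (fun y hy => h2 y hy x List.mem_cons_self)
    · intro y hy x' hx'
      rcases (PySem.List.mem_insertBy _ _ _ _).mp hy with hy | hy
      · subst hy; exact h3a x' hx'
      · exact h2 y hy x' (List.mem_cons_of_mem _ hx')
    · exact h3b

-- the sorted index list of Source B
def sIdx (cs : List Int) : List Int :=
  PySem.List.sorted (PySem.List.pyRange 0 (PySem.List.len cs))
    (fun k => PySem.List.pyGetD cs k 0) false

lemma sIdx_def (cs : List Int) :
    PySem.List.sorted (PySem.List.pyRange 0 (PySem.List.len cs))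
      (fun k => PySem.List.pyGetD cs k 0) false = sIdx cs := rfl

lemma sIdx_pw (cs : List Int) : (sIdx cs).Pairwise (Rlex cs) := by
  unfold sIdx
  rw [PySem.List.len_eq, PySem.List.sorted_eq_foldl_insertBy]
  apply foldl_ins_pw cs _ []
  · simp
  · simp
  · rw [PySem.List.pyRange_zero_natCast, List.pairwise_map]
    refine List.Pairwise.imp ?_ List.pairwise_lt_range
    intro a b h
    exact_mod_cast h

lemma sIdx_mem (cs : List Int) (a : Int) (ha : a ∈ sIdx cs) : 0 ≤ a ∧ a < (cs.length : Int) := by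
  unfold sIdx at ha
  rw [PySem.List.mem_sorted, PySem.List.len_eq, PySem.List.mem_pyRange_one] at ha
  exact ha

lemma sIdx_mem' (cs : List Int) (a : Int) (h0 : 0 ≤ a) (h1 : a < (cs.length : Int)) :
    a ∈ sIdx cs := by
  unfold sIdx
  rw [PySem.List.mem_sorted, PySem.List.len_eq, PySem.List.mem_pyRange_one]
  exact ⟨h0, h1⟩

-- the zip Source B iterates over
lemma mem_zip_iff (cs : List Int) (p : Int × Int) :
    p ∈ (sIdx cs).zip (sIdx cs).tail ↔
      ∃ q, ∃ (hq : q + 1 < (sIdx cs).length), p = ((sIdx cs)[q], (sIdx cs)[q+1]) := by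
  constructor
  · intro hp
    rw [List.mem_iff_getElem] at hp
    obtain ⟨q, hq, hpe⟩ := hp
    have hq' : q + 1 < (sIdx cs).length := by
      rw [List.length_zip, List.length_tail] at hq
      omega
    refine ⟨q, hq', ?_⟩
    rw [← hpe, List.getElem_zip, List.getElem_tail]
  · rintro ⟨q, hq, rfl⟩
    rw [List.mem_iff_getElem]
    refine ⟨q, ?_, ?_⟩
    · rw [List.length_zip, List.length_tail]
      omega
    · rw [List.getElem_zip, List.getElem_tail]

-- adjacent equal-valued indices in the sorted list are consecutive occurrences
lemma adj_cp (cs : List Int) (p : Int × Int) (hp : p ∈ (sIdx cs).zip (sIdx cs).tail)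
    (hk : keyOf cs p.1 = keyOf cs p.2) : CP cs p.1 p.2 := by
  obtain ⟨q, hq, rfl⟩ := (mem_zip_iff cs p).mp hp
  have getpw := List.pairwise_iff_getElem.mp (sIdx_pw cs)
  simp only at hk ⊢
  have hRab : Rlex cs (sIdx cs)[q] (sIdx cs)[q+1] := getpw q (q+1) (by omega) hq (by omega)
  have hab : (sIdx cs)[q] < (sIdx cs)[q+1] := by
    rcases hRab with h | ⟨_, h⟩
    · omega
    · exact h
  obtain ⟨ha0, hal⟩ := sIdx_mem cs _ (List.getElem_mem (l := sIdx cs) (n := q) (by omega))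
  obtain ⟨hb0, hbl⟩ := sIdx_mem cs _ (List.getElem_mem (l := sIdx cs) (n := q + 1) hq)
  refine ⟨ha0, hab, hbl, hk, ?_⟩
  intro m hm1 hm2 heq
  have hmmem : m ∈ sIdx cs := sIdx_mem' cs m (by omega) (by omega)
  obtain ⟨q', hq', hqm⟩ := List.mem_iff_getElem.mp hmmem
  rcases Nat.lt_trichotomy q' q with hlt | hE | hgt
  · have hR : Rlex cs (sIdx cs)[q'] (sIdx cs)[q] := getpw q' q hq' (by omega) hlt
    rw [hqm] at hR
    rcases hR with h | ⟨_, h⟩ <;> omega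
  · subst hE
    omega
  · rcases Nat.lt_trichotomy q' (q+1) with hlt2 | hE2 | hgt2
    · omega
    · subst hE2
      omega
    · have hR : Rlex cs (sIdx cs)[q+1] (sIdx cs)[q'] := getpw (q+1) q' hq hq' hgt2
      rw [hqm] at hR
      rcases hR with h | ⟨_, h⟩ <;> omega

-- every pair of consecutive occurrences appears adjacent in the sorted list
lemma cp_adj (cs : List Int) (a b : Int) (h : CP cs a b) :
    (a, b) ∈ (sIdx cs).zip (sIdx cs).tail := by
  obtain ⟨h0, hab, hbl, hkey, hbtw⟩ := h
  have getpw := List.pairwise_iff_getElem.mp (sIdx_pw cs)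
  obtain ⟨q, hq, hqa⟩ := List.mem_iff_getElem.mp (sIdx_mem' cs a h0 (by omega))
  obtain ⟨q2, hq2, hq2b⟩ := List.mem_iff_getElem.mp (sIdx_mem' cs b (by omega) hbl)
  have hqq2 : q < q2 := by
    rcases Nat.lt_trichotomy q q2 with hlt | hE | hgt
    · exact hlt
    · subst hE
      rw [hq2b] at hqa
      omega
    · have hR : Rlex cs (sIdx cs)[q2] (sIdx cs)[q] := getpw q2 q hq2 hq hgt
      rw [hqa, hq2b] at hR
      rcases hR with hR | ⟨hR, hR'⟩ <;> omega
  have hsucc : q2 = q + 1 := by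
    by_contra hne
    have hqmid : q + 1 < (sIdx cs).length := by omega
    have hR1 : Rlex cs (sIdx cs)[q] (sIdx cs)[q+1] := getpw q (q+1) hq hqmid (by omega)
    have hR2 : Rlex cs (sIdx cs)[q+1] (sIdx cs)[q2] := getpw (q+1) q2 hqmid hq2 (by omega)
    rw [hqa] at hR1
    rw [hq2b] at hR2
    have hk1 : keyOf cs a ≤ keyOf cs (sIdx cs)[q+1] := rlex_keyle hR1
    have hk2 : keyOf cs (sIdx cs)[q+1] ≤ keyOf cs b := rlex_keyle hR2
    have hkm : keyOf cs (sIdx cs)[q+1] = keyOf cs a := by omega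
    have hm1 : a < (sIdx cs)[q+1] := by
      rcases hR1 with hR | ⟨_, hR⟩ <;> omega
    have hm2 : (sIdx cs)[q+1] < b := by
      rcases hR2 with hR | ⟨_, hR⟩ <;> omega
    exact hbtw _ hm1 hm2 hkm
  subst hsucc
  rw [mem_zip_iff]
  refine ⟨q, hq2, ?_⟩
  rw [hqa, hq2b]

-- Source B's loop body
lemma foldB_none (cs : List Int) (l : List (Int × Int))
    (h : ∀ p ∈ l, keyOf cs p.1 ≠ keyOf cs p.2) :
    l.foldl (fun best p =>
        if PySem.List.pyGetD cs p.1 0 = PySem.List.pyGetD cs p.2 0 then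
          match best with
          | none => some p
          | some bb => if p.1 < bb.1 then some p else some bb
        else best) (none : Option (Int × Int)) = none := by
  simp only [keyOf_def]
  induction l with
  | nil => rfl
  | cons p l ih =>
    simp only [List.foldl_cons]
    rw [if_neg (h p List.mem_cons_self)]
    exact ih (fun q hq => h q (List.mem_cons_of_mem _ hq))

lemma foldB_min (cs : List Int) (m : Int × Int) :
    ∀ (l : List (Int × Int)) (b : Option (Int × Int)),
      (∀ p ∈ l, keyOf cs p.1 = keyOf cs p.2 → m.1 ≤ p.1 ∧ (p.1 = m.1 → p = m)) →
      ((m ∈ l ∧ keyOf cs m.1 = keyOf cs m.2) ∨ b = some m) →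
      (∀ bb, b = some bb → m.1 ≤ bb.1 ∧ (bb.1 = m.1 → bb = m)) →
      l.foldl (fun best p =>
        if PySem.List.pyGetD cs p.1 0 = PySem.List.pyGetD cs p.2 0 then
          match best with
          | none => some p
          | some bb => if p.1 < bb.1 then some p else some bb
        else best) b = some m := by
  simp only [keyOf_def]
  intro l
  induction l with
  | nil =>
    intro b h1 h2 h3
    rcases h2 with ⟨hm, _⟩ | rfl
    · simp at hm
    · rfl
  | cons p l ih =>
    intro b h1 h2 h3
    simp only [List.foldl_cons]
    by_cases hkey : keyOf cs p.1 = keyOf cs p.2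
    · rw [if_pos hkey]
      obtain ⟨hm1, hm2⟩ := h1 p List.mem_cons_self hkey
      cases b with
      | none =>
        have hred : (match (none : Option (Int × Int)) with
            | none => some p
            | some bb => if p.1 < bb.1 then some p else some bb) = some p := rfl
        rw [hred]
        apply ih _ (fun q hq hk => h1 q (List.mem_cons_of_mem _ hq) hk)
        · rcases h2 with ⟨hm, hkm⟩ | hb
          · rcases List.mem_cons.mp hm with he | hm'
            · right; rw [he]
            · left; exact ⟨hm', hkm⟩
          · simp at hb
        · intro bb hbb
          injection hbb with hbb
          rw [← hbb]
          exact ⟨hm1, hm2⟩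
      | some bb0 =>
        obtain ⟨hb1, hb2⟩ := h3 bb0 rfl
        have hred : (match some bb0 with
            | none => some p
            | some bb => if p.1 < bb.1 then some p else some bb) =
            (if p.1 < bb0.1 then some p else some bb0) := rfl
        rw [hred]
        apply ih _ (fun q hq hk => h1 q (List.mem_cons_of_mem _ hq) hk)
        · rcases h2 with ⟨hm, hkm⟩ | hb
          · rcases List.mem_cons.mp hm with he | hm'
            · right
              by_cases hlt : p.1 < bb0.1
              · rw [if_pos hlt, he]
              · rw [if_neg hlt]
                have hble : bb0.1 ≤ p.1 := not_lt.mp hlt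
                have hpm : m.1 = p.1 := by rw [he]
                have heq : bb0.1 = m.1 := by omega
                rw [hb2 heq]
            · left; exact ⟨hm', hkm⟩
          · injection hb with hb
            right
            rw [if_neg (by rw [hb]; omega)]
            rw [hb]
        · intro bb hbb
          by_cases hlt : p.1 < bb0.1
          · rw [if_pos hlt] at hbb
            injection hbb with hbb
            rw [← hbb]
            exact ⟨hm1, hm2⟩
          · rw [if_neg hlt] at hbb
            injection hbb with hbb
            rw [← hbb]
            exact ⟨hb1, hb2⟩
    · rw [if_neg hkey]
      apply ih _ (fun q hq hk => h1 q (List.mem_cons_of_mem _ hq) hk) _ h3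
      rcases h2 with ⟨hm, hkm⟩ | hb
      · rcases List.mem_cons.mp hm with he | hm'
        · rw [he] at hkm; exact absurd hkm hkey
        · left; exact ⟨hm', hkm⟩
      · right; exact hb

-- bridges between keyOf/CP and the Nat-indexed refAux facts
lemma keyOf_nat (cs : List Int) (k : Nat) (hk : k < cs.length) :
    keyOf cs (k : Int) = cs[k] := by
  simp [keyOf, PySem.List.pyGetD_natCast, hk]

lemma cp_dup (cs : List Int) (a b : Int) (h : CP cs a b) :
    ∃ (ha : a.toNat < cs.length), cs[a.toNat] ∈ cs.drop (a.toNat + 1) := by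
  obtain ⟨h0, hab, hbl, hkey, _⟩ := h
  have hbn : b.toNat < cs.length := by omega
  have han : a.toNat < cs.length := by omega
  have hanb : a.toNat + 1 ≤ b.toNat := by omega
  refine ⟨han, ?_⟩
  have hkv : cs[a.toNat] = cs[b.toNat] := by
    have h1 := keyOf_nat cs a.toNat han
    have h2 := keyOf_nat cs b.toNat hbn
    rw [Int.toNat_of_nonneg h0] at h1
    rw [Int.toNat_of_nonneg (by omega : (0:Int) ≤ b)] at h2
    rw [← h1, ← h2]
    exact hkey
  have hget : (cs.drop (a.toNat + 1))[b.toNat - (a.toNat + 1)]'(by simp; omega) = cs[b.toNat] := by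
    rw [List.getElem_drop]
    congr 1
    omega
  rw [hkv, ← hget]
  exact List.getElem_mem _

lemma cp_ref (cs : List Int) (i j : Nat) (h : refAux cs 0 = some (i, j)) :
    CP cs (i : Int) (j : Int) := by
  obtain ⟨hi, hidx, hij, hbef⟩ := refAux_some cs i j h
  have hidx' : PySem.List.index? (cs.drop (i+1)) cs[i] = some (j - (i+1)) := by
    rw [PySem.List.index?_eq_idxOf?]
    exact hidx
  obtain ⟨hk, hval, hbefk⟩ := PySem.List.getElem_of_index?_eq_some hidx'
  have hjl : j < cs.length := by
    simp only [List.length_drop] at hk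
    omega
  have hji : i + 1 + (j - (i + 1)) = j := by omega
  rw [List.getElem_drop] at hval
  simp only [hji] at hval
  refine ⟨by omega, by exact_mod_cast hij, by exact_mod_cast hjl, ?_, ?_⟩
  · rw [keyOf_nat cs i hi, keyOf_nat cs j hjl, hval]
  · intro m hm1 hm2 heq
    have hm0 : 0 ≤ m := by omega
    have hmn : m.toNat < cs.length := by omega
    have hmn1 : i < m.toNat := by omega
    have hmn2 : m.toNat < j := by omega
    have hkm : keyOf cs m = cs[m.toNat] := by
      have := keyOf_nat cs m.toNat hmn
      rwa [Int.toNat_of_nonneg hm0] at this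
    have hgoal : cs[m.toNat] ≠ cs[i] := by
      have hb := hbefk (m.toNat - (i+1)) (by omega)
      have hmi : i + 1 + (m.toNat - (i + 1)) = m.toNat := by omega
      rw [List.getElem_drop] at hb
      simp only [hmi] at hb
      exact hb
    apply hgoal
    rw [← hkm, heq, keyOf_nat cs i hi]

lemma cp_min (cs : List Int) (i j : Nat) (h : refAux cs 0 = some (i, j))
    (a b : Int) (hab : CP cs a b) : (i : Int) ≤ a := by
  obtain ⟨_, hidx, _, hbef⟩ := refAux_some cs i j h
  obtain ⟨han, hdup⟩ := cp_dup cs a b hab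
  have h0 : 0 ≤ a := hab.1
  by_contra hlt
  exact hbef a.toNat (by omega) hdup

lemma cp_partner (cs : List Int) (a b b' : Int) (h1 : CP cs a b) (h2 : CP cs a b') :
    b = b' := by
  obtain ⟨_, hab, _, hk1, hbtw1⟩ := h1
  obtain ⟨_, hab', _, hk2, hbtw2⟩ := h2
  rcases lt_trichotomy b b' with hlt | hE | hgt
  · exact absurd hk1.symm (hbtw2 b hab hlt)
  · exact hE
  · exact absurd hk2.symm (hbtw1 b' hab' hgt)

lemma portB_eq_ref (l : List Int) :
    repairChromosome_alt l =
      (match refAux l 0 with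
       | none => l
       | some ij => l.take ij.1 ++ l.drop ij.2) := by
  simp only [repairChromosome_alt, PySem.List.slice_from_one, sIdx_def]
  cases hr : refAux l 0 with
  | none =>
    have hne : ∀ p ∈ (sIdx l).zip (sIdx l).tail, keyOf l p.1 ≠ keyOf l p.2 := by
      intro p hp heq
      have hcp := adj_cp l p hp heq
      obtain ⟨han, hdup⟩ := cp_dup l p.1 p.2 hcp
      exact refAux_none l hr p.1.toNat han hdup
    rw [foldB_none l _ hne]
  | some ij =>
    obtain ⟨i, j⟩ := ij
    have hcp := cp_ref l i j hr
    have h1 : ∀ p ∈ (sIdx l).zip (sIdx l).tail,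
        keyOf l p.1 = keyOf l p.2 →
          ((i : Int), (j : Int)).1 ≤ p.1 ∧ (p.1 = ((i : Int), (j : Int)).1 → p = ((i : Int), (j : Int))) := by
      intro p hp hkeq
      obtain ⟨p1, p2⟩ := p
      have hcpp := adj_cp l (p1, p2) hp hkeq
      simp only at hcpp ⊢
      refine ⟨cp_min l i j hr p1 p2 hcpp, ?_⟩
      intro he
      have hcpp' : CP l (i : Int) p2 := by rw [he] at hcpp; exact hcpp
      have hb := cp_partner l (i : Int) p2 (j : Int) hcpp' hcp
      rw [he, hb]
    have h2 : (((i : Int), (j : Int)) ∈ (sIdx l).zip (sIdx l).tail ∧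
        keyOf l ((i : Int), (j : Int)).1 = keyOf l ((i : Int), (j : Int)).2) ∨
        (none : Option (Int × Int)) = some ((i : Int), (j : Int)) := by
      left
      exact ⟨cp_adj l (i : Int) (j : Int) hcp, hcp.2.2.2.1⟩
    rw [foldB_min l ((i : Int), (j : Int)) _ none h1 h2 (by simp)]
    show PySem.List.slice l none (some (i : Int)) ++ PySem.List.slice l (some (j : Int)) none
        = l.take i ++ l.drop j
    rw [PySem.List.slice_to_natCast, PySem.List.slice_from_natCast]

-- ===== VERDICT (by name: the statement is the Claim_ definition above) =====
theorem repairChromosome_spec : Claim_equal_repairChromosome := by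
  intro l _
  unfold Spec_repairChromosome
  rw [portA_eq_ref, portB_eq_ref]
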